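-- pv_equiv track=rewrite | github.com/GowthamSagar310/Competitive-Programming-Problems | codeforces/all_solutions/1778A.py | solve
-- ===== SOURCE A (Python) =====
-- def solve(arr):
--     c = 0
--     negative_present = False
--     for val in arr:
--         if val == -1:
--             negative_present = True
--             c += 1
--             if c > 1:
--                 return sum(arr)+4
--         else:
--             c = 0
--     if negative_present:
--         return sum(arr)
--     else:
--         return sum(arr)-4
-- ===== SOURCE B (Python) =====
-- def solve(arr):
--     pattern = ''.join('N' if v == -1 else 'P' for v in arr)
--     if 'NN' in pattern:
--         delta = 4
--     elif 'N' in pattern: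
--         delta = 0
--     else:
--         delta = -4
--     return sum(arr) + delta
-- ===== Notes on version B (the rewrite author's own statement) =====
-- stated objective: alternative
-- what changed: Instead of A's stateful counter loop with an early return, B encodes the array as an N/P character pattern string and decides the +4/0/-4 adjustment by substring search ('NN' in pattern, 'N' in pattern), adding it to the sum once.
import Mathlib
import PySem

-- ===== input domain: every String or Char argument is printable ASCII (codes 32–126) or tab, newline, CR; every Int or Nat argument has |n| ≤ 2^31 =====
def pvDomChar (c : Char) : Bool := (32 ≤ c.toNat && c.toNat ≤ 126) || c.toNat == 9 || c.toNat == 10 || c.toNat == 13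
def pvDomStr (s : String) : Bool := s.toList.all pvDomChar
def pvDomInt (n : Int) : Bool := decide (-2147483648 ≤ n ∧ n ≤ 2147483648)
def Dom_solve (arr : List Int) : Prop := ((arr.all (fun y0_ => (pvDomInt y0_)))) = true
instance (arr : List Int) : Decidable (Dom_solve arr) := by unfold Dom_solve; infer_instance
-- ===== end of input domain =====

-- B replaces A's stateful counter loop by encoding the array as an N/P character
-- pattern and deciding the ±4 adjustment by substring search; objective: alternative.

-- ===== PORT A =====
-- loop over arr carrying counter c and negative_present flag; `full` is the whole
-- list, used by the `sum(arr)` calls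
def solveLoop (full : List Int) (arr : List Int) (c : Int) (neg : Bool) : Int :=
  match arr with
  | [] => if neg then full.sum else full.sum - 4
  | v :: rest =>
      if v = -1 then
        if c + 1 > 1 then full.sum + 4
        else solveLoop full rest (c + 1) true
      else solveLoop full rest 0 neg

def solve (arr : List Int) : Int := solveLoop arr arr 0 false

-- ===== PORT B =====
-- encodeChar: the per-element encoding ('N' if v == -1 else 'P')
def encodeChar (v : Int) : Char := if v = -1 then 'N' else 'P'

-- hasNN: Python's `'NN' in pattern` (substring search for the fixed 2-char needle)
def hasNN : List Char → Bool
  | 'N' :: 'N' :: _ => true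
  | _ :: rest => hasNN rest
  | [] => false

def solve_alt (arr : List Int) : Int :=
  let pattern := arr.map encodeChar
  let delta : Int :=
    if hasNN pattern then 4
    else if pattern.contains 'N' then 0
    else -4
  arr.sum + delta

-- ===== PRECONDITION & SPEC =====
def Spec_solve (arr : List Int) (out : Int) : Prop := out = solve_alt arr
instance (arr : List Int) (out : Int) : Decidable (Spec_solve arr out) := by unfold Spec_solve; infer_instance

-- ===== CLAIM (what is proved, stated in full; the proofs are below) =====
def Claim_equal_solve : Prop := ∀ (arr : List Int), Dom_solve arr → Spec_solve arr (solve arr)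

-- ===== LEMMAS AND PROOFS =====

-- head of the list is -1
def hdNeg (arr : List Int) : Bool :=
  match arr with
  | [] => false
  | x :: _ => x == -1

lemma hasNN_cons (v : Int) (rest : List Int) :
    hasNN ((v :: rest).map encodeChar) = ((v == -1 && hdNeg rest) || hasNN (rest.map encodeChar)) := by
  cases rest with
  | nil =>
    by_cases hv : v = -1 <;> simp [encodeChar, hasNN, hdNeg, hv]
  | cons w rest' =>
    by_cases hv : v = -1 <;> by_cases hw : w = -1 <;>
      simp [encodeChar, hasNN, hdNeg, hv, hw]

lemma contains_map (arr : List Int) :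
    ((arr.map encodeChar).contains 'N') = arr.contains (-1) := by
  induction arr with
  | nil => simp
  | cons v rest ih =>
    by_cases hv : v = -1
    · simp [encodeChar, hv]
    · simp only [List.map_cons, List.contains_cons, encodeChar, if_neg hv, ih]
      have hb : ((v == -1) = false) := by simpa using hv
      have hb' : (((-1 : Int) == v) = false) := by
        simp; intro h; exact hv h.symm
      simp [hb']

lemma solveLoop_eq (arr full : List Int) (c : Int) (neg : Bool) (hc0 : 0 ≤ c) :
    solveLoop full arr c neg =
      if (decide (0 < c) && hdNeg arr) || hasNN (arr.map encodeChar) then full.sum + 4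
      else if neg || arr.contains (-1) then full.sum
      else full.sum - 4 := by
  induction arr generalizing c neg with
  | nil => simp [solveLoop, hasNN, hdNeg]
  | cons v rest ih =>
    rw [solveLoop, hasNN_cons]
    by_cases hv : v = -1
    · subst hv
      rw [if_pos rfl]
      have hhd : hdNeg (-1 :: rest) = true := by simp [hdNeg]
      have hmem : ((-1 :: rest).contains (-1)) = true := by simp
      by_cases hc : 0 < c
      · rw [if_pos (by omega : c + 1 > 1)]
        have : (decide (0 < c) && hdNeg (-1 :: rest)) = true := by
          rw [hhd]; simpa using hc
        rw [this, Bool.true_or, if_pos rfl]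
      · rw [if_neg (by omega : ¬ c + 1 > 1), ih (c + 1) true (by omega)]
        have h0 : decide (0 < c) = false := by simpa using hc
        have h1 : decide (0 < c + 1) = true := by simp; omega
        rw [h0, h1, hhd, hmem]
        simp [hdNeg]
    · rw [if_neg hv, ih 0 neg (le_refl 0)]
      have hb : ((v == -1) = false) := by simpa using hv
      have hhd : hdNeg (v :: rest) = false := by simp [hdNeg, hb]
      have hmem : ((v :: rest).contains (-1)) = rest.contains (-1) := by
        simp only [List.contains_cons]
        have hb' : (((-1 : Int) == v) = false) := by
          simp; intro h; exact hv h.symm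
        simp [hb']
      rw [hhd, hb, hmem]
      simp

theorem solve_agrees (arr : List Int) : solve arr = solve_alt arr := by
  rw [solve, solveLoop_eq arr arr 0 false (le_refl 0)]
  have h0 : (decide ((0:Int) < 0) && hdNeg arr) = false := by simp
  simp only [solve_alt, contains_map, h0, Bool.false_or]
  by_cases hp : hasNN (arr.map encodeChar)
  · simp [hp]
  · by_cases hn : arr.contains (-1)
    · have hn' : (-1 : Int) ∈ arr := by simpa using hn
      simp [hp, hn']
    · have hn' : ¬ (-1 : Int) ∈ arr := by simpa using hn
      simp [hp, hn', Int.sub_eq_add_neg]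

-- ===== VERDICT (by name: the statement is the Claim_ definition above) =====
theorem solve_spec : Claim_equal_solve := by
  intro arr _
  unfold Spec_solve
  exact solve_agrees arr
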